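-- pv_equiv track=rewrite | github.com/michaelworkspace/InterviewProblems | AlphabetSoup.py | alphapetize
-- ===== SOURCE A (Python) =====
-- def alphapetize(word: str) -> str:
--     """Returns a sorted string with capital letters in front of it's lowercase counterparts."""
--
--     sorted_word = sorted(word)
--
--     cap_letters = []
--     lower_word = sorted(word.lower())
--     new_word = []
--
--     for letter in sorted_word:
--         if letter.isupper():
--             cap_letters.append(letter)
--
--     for letter in lower_word:
--         if letter.upper() in cap_letters:
--             new_word.append(letter.upper())
--             cap_letters.remove(letter.upper())
--         else:
--             new_word.append(letter)
--
--     new_word = "".join(new_word)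
--
--     return new_word
-- ===== SOURCE B (Python) =====
-- def alphapetize(word: str) -> str:
--     """Returns a sorted string with capital letters in front of it's lowercase counterparts."""
--     return "".join(sorted(word, key=lambda c: (c.lower(), c.islower())))
-- ===== Notes on version B (the rewrite author's own statement) =====
-- stated objective: simpler
-- what changed: Replaces A's two sorts plus capital-collection pass plus greedy consume-and-remove loop with a single keyed sort: sort the characters by (c.lower(), c.islower()), which groups case-insensitively and puts each capital before its lowercase counterpart.
import Mathlib
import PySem

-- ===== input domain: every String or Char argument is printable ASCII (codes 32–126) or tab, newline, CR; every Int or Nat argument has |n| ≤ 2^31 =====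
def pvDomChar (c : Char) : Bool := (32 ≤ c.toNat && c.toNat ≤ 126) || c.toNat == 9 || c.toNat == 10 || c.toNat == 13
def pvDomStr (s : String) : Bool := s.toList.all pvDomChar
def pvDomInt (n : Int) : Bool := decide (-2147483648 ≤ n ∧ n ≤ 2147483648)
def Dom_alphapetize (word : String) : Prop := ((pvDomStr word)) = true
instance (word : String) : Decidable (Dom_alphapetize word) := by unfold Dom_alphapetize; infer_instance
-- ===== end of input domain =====

-- B replaces A's two sorts + capital-collection pass + greedy remove-loop by one keyed sort
-- (key = (c.lower(), c.islower())); objective: simpler.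

-- ===== PORT A =====
def alphapetize (word : String) : String :=
  let sorted_word := PySem.List.sorted word.toList (fun c => c) false
  let cap_letters := sorted_word.foldl
    (fun acc letter => if PySem.Chars.isupper letter then acc ++ [letter] else acc) []
  let lower_word := PySem.List.sorted (PySem.Chars.lower word.toList) (fun c => c) false
  -- 'cap_letters.remove(letter.upper())' is guarded by the membership test, so Python's
  -- list.remove (deletes the first occurrence, no ValueError possible here) is List.erase
  let p := lower_word.foldl
    (fun (s : List Char × List Char) letter =>
      if PySem.Chars.upperChar letter ∈ s.2 then
        (s.1 ++ [PySem.Chars.upperChar letter], s.2.erase (PySem.Chars.upperChar letter))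
      else
        (s.1 ++ [letter], s.2))
    ([], cap_letters)
  String.mk p.1

-- ===== PORT B =====
def alphapetize_alt (word : String) : String :=
  String.mk (PySem.List.sorted2 word.toList PySem.Chars.lowerChar PySem.Chars.islower false)

-- ===== PRECONDITION & SPEC =====
def Spec_alphapetize (word : String) (out : String) : Prop := out = alphapetize_alt word
instance (word : String) (out : String) : Decidable (Spec_alphapetize word out) := by unfold Spec_alphapetize; infer_instance

-- ===== CLAIM (what is proved, stated in full; the proofs are below) =====
def Claim_equal_alphapetize : Prop := ∀ (word : String), Dom_alphapetize word → Spec_alphapetize word (alphapetize word)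

-- ===== LEMMAS AND PROOFS =====

-- Char order / case basics
theorem pvCharLt (a b : Char) : a < b ↔ a.toNat < b.toNat := by
  rw [Char.lt_def, UInt32.lt_iff_toNat_lt]; rfl

theorem pvCharLe (a b : Char) : a ≤ b ↔ a.toNat ≤ b.toNat := by
  rw [Char.le_def, UInt32.le_iff_toNat_le]; rfl

theorem pvCharEq (a b : Char) : a = b ↔ a.toNat = b.toNat := by
  constructor
  · intro h; rw [h]
  · intro h; exact Char.ext (by exact UInt32.toNat_inj.mp h)

theorem pvUpperIff (c : Char) : PySem.Chars.isupper c = true ↔ 65 ≤ c.toNat ∧ c.toNat ≤ 90 := by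
  rw [PySem.Chars.isupper, Bool.and_eq_true, decide_eq_true_iff, decide_eq_true_iff,
    pvCharLe, pvCharLe]
  exact Iff.rfl

theorem pvLowerIff (c : Char) : PySem.Chars.islower c = true ↔ 97 ≤ c.toNat ∧ c.toNat ≤ 122 := by
  rw [PySem.Chars.islower, Bool.and_eq_true, decide_eq_true_iff, decide_eq_true_iff,
    pvCharLe, pvCharLe]
  exact Iff.rfl

theorem pvToNatLowerChar (c : Char) (h : PySem.Chars.isupper c = true) :
    (PySem.Chars.lowerChar c).toNat = c.toNat + 32 := by
  rw [PySem.Chars.lowerChar, if_pos h, Char.toNat_ofNat, if_pos]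
  rw [pvUpperIff] at h
  exact Or.inl (by omega)

theorem pvToNatUpperChar (c : Char) (h : PySem.Chars.islower c = true) :
    (PySem.Chars.upperChar c).toNat = c.toNat - 32 := by
  rw [PySem.Chars.upperChar, if_pos h, Char.toNat_ofNat, if_pos]
  rw [pvLowerIff] at h
  exact Or.inl (by omega)

theorem pvLowerCharId (c : Char) (h : PySem.Chars.isupper c = false) :
    PySem.Chars.lowerChar c = c := by
  rw [PySem.Chars.lowerChar, if_neg (by simp [h])]

theorem pvUpperCharId (c : Char) (h : PySem.Chars.islower c = false) :
    PySem.Chars.upperChar c = c := by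
  rw [PySem.Chars.upperChar, if_neg (by simp [h])]

theorem pvNotUpperLowerChar (c : Char) : PySem.Chars.isupper (PySem.Chars.lowerChar c) = false := by
  by_cases h : PySem.Chars.isupper c = true
  · have h2 := pvToNatLowerChar c h
    rw [pvUpperIff] at h
    rw [Bool.eq_false_iff, Ne, pvUpperIff]
    omega
  · rw [pvLowerCharId c (by simpa using h)]
    simpa using h

theorem pvLowerLowerChar (c : Char) (h : PySem.Chars.isupper c = true) :
    PySem.Chars.islower (PySem.Chars.lowerChar c) = true := by
  have h2 := pvToNatLowerChar c h
  rw [pvUpperIff] at h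
  rw [pvLowerIff]
  omega

theorem pvUpperUpperChar (c : Char) (h : PySem.Chars.islower c = true) :
    PySem.Chars.isupper (PySem.Chars.upperChar c) = true := by
  have h2 := pvToNatUpperChar c h
  rw [pvLowerIff] at h
  rw [pvUpperIff]
  omega

theorem pvNotBoth (c : Char) (h : PySem.Chars.islower c = true) :
    PySem.Chars.isupper c = false := by
  rw [pvLowerIff] at h
  rw [Bool.eq_false_iff, Ne, pvUpperIff]
  omega

theorem pvLowerUpperChar (c : Char) (h : PySem.Chars.islower c = true) :
    PySem.Chars.lowerChar (PySem.Chars.upperChar c) = c := by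
  rw [pvCharEq, pvToNatLowerChar _ (pvUpperUpperChar c h), pvToNatUpperChar c h]
  rw [pvLowerIff] at h
  omega

theorem pvUpperLowerChar (c : Char) (h : PySem.Chars.isupper c = true) :
    PySem.Chars.upperChar (PySem.Chars.lowerChar c) = c := by
  rw [pvCharEq, pvToNatUpperChar _ (pvLowerLowerChar c h), pvToNatLowerChar c h]
  rw [pvUpperIff] at h
  omega

theorem pvLowOfUpperCharUpper (l : Char) (hl : PySem.Chars.isupper l = false)
    (h : PySem.Chars.isupper (PySem.Chars.upperChar l) = true) :
    PySem.Chars.islower l = true := by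
  by_contra hc
  rw [pvUpperCharId l (by simpa using hc)] at h
  rw [h] at hl
  exact absurd hl (by simp)

theorem pvUpperNotLower (c : Char) (h : PySem.Chars.isupper c = true) :
    PySem.Chars.islower c = false := by
  rw [pvUpperIff] at h
  rw [Bool.eq_false_iff, Ne, pvLowerIff]
  omega

-- the single sort key of B, packed into one Nat (lexicographic (c.lower(), c.islower()))
def pvKey (c : Char) : Nat :=
  2 * (PySem.Chars.lowerChar c).toNat + (if PySem.Chars.islower c = true then 1 else 0)

theorem pvKeyUpper (l : Char) (h : PySem.Chars.islower l = true) :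
    pvKey (PySem.Chars.upperChar l) = 2 * l.toNat := by
  unfold pvKey
  rw [pvLowerUpperChar l h, pvUpperNotLower _ (pvUpperUpperChar l h)]
  simp

theorem pvKeyPlain (l : Char) (h : PySem.Chars.isupper l = false) :
    pvKey l = 2 * l.toNat + (if PySem.Chars.islower l = true then 1 else 0) := by
  unfold pvKey
  rw [pvLowerCharId l h]

theorem pvKeyInj : Function.Injective pvKey := by
  intro a b h
  unfold pvKey at h
  have hbit : PySem.Chars.islower a = PySem.Chars.islower b := by
    by_cases ha : PySem.Chars.islower a = true <;> by_cases hb : PySem.Chars.islower b = true <;>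
      simp [ha, hb] at h ⊢ <;> omega
  have hlc : PySem.Chars.lowerChar a = PySem.Chars.lowerChar b := by
    rw [pvCharEq]
    rcases Bool.eq_false_or_eq_true (PySem.Chars.islower a) with ha | ha <;>
      rw [ha] at hbit <;> rw [ha, ← hbit] at h <;> simp at h <;> omega
  by_cases ha : PySem.Chars.islower a = true
  · have hb : PySem.Chars.islower b = true := by rw [← hbit, ha]
    rwa [pvLowerCharId a (pvNotBoth a ha), pvLowerCharId b (pvNotBoth b hb)] at hlc
  · have hb : PySem.Chars.islower b ≠ true := by rw [← hbit]; exact ha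
    by_cases hua : PySem.Chars.isupper a = true <;> by_cases hub : PySem.Chars.isupper b = true
    · have := congrArg PySem.Chars.upperChar hlc
      rwa [pvUpperLowerChar a hua, pvUpperLowerChar b hub] at this
    · exfalso
      rw [pvLowerCharId b (by simpa using hub)] at hlc
      have h1 := pvLowerLowerChar a hua
      rw [hlc] at h1
      exact hb h1
    · exfalso
      rw [pvLowerCharId a (by simpa using hua)] at hlc
      have h1 := pvLowerLowerChar b hub
      rw [← hlc] at h1
      exact ha h1
    · rw [pvLowerCharId a (by simpa using hua), pvLowerCharId b (by simpa using hub)] at hlc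
      exact hlc

-- B's comparator (tuple key) is exactly the comparator of the packed key
theorem pvCmpEq :
    (fun a b : Char => decide (PySem.Chars.lowerChar a < PySem.Chars.lowerChar b) ||
      (!decide (PySem.Chars.lowerChar b < PySem.Chars.lowerChar a) &&
        decide (PySem.Chars.islower a < PySem.Chars.islower b))) =
    fun a b : Char => decide (pvKey a < pvKey b) := by
  funext a b
  rw [Bool.eq_iff_iff]
  simp only [Bool.or_eq_true, Bool.and_eq_true, Bool.not_eq_eq_eq_not, Bool.not_true,
    decide_eq_true_iff, decide_eq_false_iff_not]
  rw [pvCharLt, pvCharLt, Bool.lt_iff]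
  unfold pvKey
  by_cases ha : PySem.Chars.islower a = true <;> by_cases hb : PySem.Chars.islower b = true <;>
    simp [ha, hb] <;> omega

theorem pvAltEq (xs : List Char) :
    PySem.List.sorted2 xs PySem.Chars.lowerChar PySem.Chars.islower false =
      PySem.List.sorted xs pvKey false := by
  rw [PySem.List.sorted_eq_foldl_insertBy, PySem.List.sorted2, ← pvCmpEq]
  rfl

-- A's consuming loop in recursive form
def pvLoop : List Char → List Char → List Char
  | [], _ => []
  | l :: rest, caps =>
    if PySem.Chars.upperChar l ∈ caps then
      PySem.Chars.upperChar l :: pvLoop rest (caps.erase (PySem.Chars.upperChar l))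
    else l :: pvLoop rest caps

theorem pvFoldlEq (lw : List Char) : ∀ (nw caps : List Char),
    (lw.foldl
      (fun (s : List Char × List Char) letter =>
        if PySem.Chars.upperChar letter ∈ s.2 then
          (s.1 ++ [PySem.Chars.upperChar letter], s.2.erase (PySem.Chars.upperChar letter))
        else
          (s.1 ++ [letter], s.2))
      (nw, caps)).1 = nw ++ pvLoop lw caps := by
  induction lw with
  | nil => intro nw caps; simp [pvLoop]
  | cons l rest ih =>
    intro nw caps
    rw [List.foldl_cons, pvLoop]
    by_cases h : PySem.Chars.upperChar l ∈ caps
    · rw [if_pos h, if_pos h, ih]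
      simp
    · rw [if_neg h, if_neg h, ih]
      simp

-- every output element of the loop is its letter or a consumed capital of it
theorem pvLoopMem : ∀ (lw caps : List Char), ∀ o ∈ pvLoop lw caps,
    ∃ l ∈ lw, o = l ∨ (o = PySem.Chars.upperChar l ∧ o ∈ caps) := by
  intro lw
  induction lw with
  | nil => intro caps o ho; simp [pvLoop] at ho
  | cons l rest ih =>
    intro caps o ho
    rw [pvLoop] at ho
    by_cases h : PySem.Chars.upperChar l ∈ caps
    · rw [if_pos h] at ho
      rcases List.mem_cons.mp ho with h1 | h1
      · exact ⟨l, List.mem_cons_self, Or.inr ⟨h1, h1 ▸ h⟩⟩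
      · obtain ⟨l', hl', hcase⟩ := ih _ o h1
        refine ⟨l', List.mem_cons_of_mem _ hl', ?_⟩
        rcases hcase with h2 | ⟨h2, h3⟩
        · exact Or.inl h2
        · exact Or.inr ⟨h2, List.erase_subset h3⟩
    · rw [if_neg h] at ho
      rcases List.mem_cons.mp ho with h1 | h1
      · exact ⟨l, List.mem_cons_self, Or.inl h1⟩
      · obtain ⟨l', hl', hcase⟩ := ih _ o h1
        exact ⟨l', List.mem_cons_of_mem _ hl', hcase⟩

-- multiset content of the loop: output + lowered capitals = letters + capitals
theorem pvLoopPerm : ∀ (lw caps : List Char),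
    (∀ l ∈ lw, PySem.Chars.isupper l = false) →
    (∀ U ∈ caps, PySem.Chars.isupper U = true) →
    (∀ U ∈ caps, caps.count U ≤ lw.count (PySem.Chars.lowerChar U)) →
    (pvLoop lw caps ++ caps.map PySem.Chars.lowerChar).Perm (lw ++ caps) := by
  intro lw
  induction lw with
  | nil =>
    intro caps _ _ hcount
    have hnil : caps = [] := by
      cases caps with
      | nil => rfl
      | cons U t =>
        exfalso
        have h1 := hcount U List.mem_cons_self
        rw [List.count_nil] at h1
        have h2 : 0 < (U :: t).count U := List.count_pos_iff.mpr List.mem_cons_self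
        omega
    simp [pvLoop, hnil]
  | cons l rest ih =>
    intro caps hlow hcaps hcount
    have hl : PySem.Chars.isupper l = false := hlow l List.mem_cons_self
    have hlowr : ∀ x ∈ rest, PySem.Chars.isupper x = false :=
      fun x hx => hlow x (List.mem_cons_of_mem _ hx)
    rw [pvLoop]
    by_cases h : PySem.Chars.upperChar l ∈ caps
    · rw [if_pos h]
      have hU : PySem.Chars.isupper (PySem.Chars.upperChar l) = true := hcaps _ h
      have hll : PySem.Chars.islower l = true := pvLowOfUpperCharUpper l hl hU
      have hlc : PySem.Chars.lowerChar (PySem.Chars.upperChar l) = l := pvLowerUpperChar l hll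
      have hperm : caps.Perm (PySem.Chars.upperChar l :: caps.erase (PySem.Chars.upperChar l)) :=
        List.perm_cons_erase h
      have hcount' : ∀ V ∈ caps.erase (PySem.Chars.upperChar l),
          (caps.erase (PySem.Chars.upperChar l)).count V ≤ rest.count (PySem.Chars.lowerChar V) := by
        intro V hV
        have hVc : V ∈ caps := List.erase_subset hV
        by_cases hVU : V = PySem.Chars.upperChar l
        · have h1 := hcount V hVc
          rw [hVU] at h1 ⊢
          rw [hlc] at h1 ⊢
          rw [List.count_erase_self]
          rw [List.count_cons_self] at h1
          omega
        · have h1 := hcount V hVc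
          rw [List.count_erase_of_ne hVU]
          have hne : PySem.Chars.lowerChar V ≠ l := by
            intro hc
            apply hVU
            have := congrArg PySem.Chars.upperChar hc
            rwa [pvUpperLowerChar V (hcaps V hVc)] at this
          rwa [List.count_cons_of_ne (Ne.symm hne)] at h1
      have hihp := ih (caps.erase (PySem.Chars.upperChar l)) hlowr
        (fun U hU' => hcaps U (List.erase_subset hU')) hcount'
      -- assemble the permutation
      have hmap : (caps.map PySem.Chars.lowerChar).Perm
          (l :: (caps.erase (PySem.Chars.upperChar l)).map PySem.Chars.lowerChar) := by
        have := hperm.map PySem.Chars.lowerChar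
        rwa [List.map_cons, hlc] at this
      -- assemble: U :: (loop ++ map caps) ~ U :: l :: (loop ++ map caps') ~ ... ~ (l :: rest) ++ caps
      have e1 : (PySem.Chars.upperChar l :: (pvLoop rest (caps.erase (PySem.Chars.upperChar l)) ++
            caps.map PySem.Chars.lowerChar)).Perm
          (PySem.Chars.upperChar l :: (pvLoop rest (caps.erase (PySem.Chars.upperChar l)) ++
            (l :: (caps.erase (PySem.Chars.upperChar l)).map PySem.Chars.lowerChar))) :=
        (hmap.append_left _).cons _
      have e2 : (PySem.Chars.upperChar l :: (pvLoop rest (caps.erase (PySem.Chars.upperChar l)) ++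
            (l :: (caps.erase (PySem.Chars.upperChar l)).map PySem.Chars.lowerChar))).Perm
          (PySem.Chars.upperChar l :: l :: (pvLoop rest (caps.erase (PySem.Chars.upperChar l)) ++
            (caps.erase (PySem.Chars.upperChar l)).map PySem.Chars.lowerChar)) :=
        List.perm_middle.cons _
      have e3 : (PySem.Chars.upperChar l :: l :: (pvLoop rest (caps.erase (PySem.Chars.upperChar l)) ++
            (caps.erase (PySem.Chars.upperChar l)).map PySem.Chars.lowerChar)).Perm
          (PySem.Chars.upperChar l :: l :: (rest ++ caps.erase (PySem.Chars.upperChar l))) :=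
        (hihp.cons _).cons _
      have e4 : (PySem.Chars.upperChar l :: l :: (rest ++ caps.erase (PySem.Chars.upperChar l))).Perm
          (l :: PySem.Chars.upperChar l :: (rest ++ caps.erase (PySem.Chars.upperChar l))) :=
        List.Perm.swap _ _ _
      have e5 : (l :: PySem.Chars.upperChar l :: (rest ++ caps.erase (PySem.Chars.upperChar l))).Perm
          (l :: (rest ++ PySem.Chars.upperChar l :: caps.erase (PySem.Chars.upperChar l))) :=
        List.perm_middle.symm.cons _
      have e6 : (l :: (rest ++ PySem.Chars.upperChar l :: caps.erase (PySem.Chars.upperChar l))).Perm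
          (l :: (rest ++ caps)) :=
        ((hperm.symm.append_left rest).cons l)
      exact ((((e1.trans e2).trans e3).trans e4).trans e5).trans e6
    · rw [if_neg h]
      have hcount' : ∀ V ∈ caps, caps.count V ≤ rest.count (PySem.Chars.lowerChar V) := by
        intro V hV
        have h1 := hcount V hV
        have hne : PySem.Chars.lowerChar V ≠ l := by
          intro hc
          apply h
          have := congrArg PySem.Chars.upperChar hc
          rw [pvUpperLowerChar V (hcaps V hV)] at this
          rwa [← this]
        rwa [List.count_cons_of_ne (Ne.symm hne)] at h1
      have hihp := ih caps hlowr hcaps hcount'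
      exact hihp.cons l

-- the loop output is sorted by the packed key
theorem pvLoopPairwise : ∀ (lw caps : List Char),
    lw.Pairwise (· ≤ ·) →
    (∀ l ∈ lw, PySem.Chars.isupper l = false) →
    (∀ U ∈ caps, PySem.Chars.isupper U = true) →
    (pvLoop lw caps).Pairwise (fun a b => pvKey a ≤ pvKey b) := by
  intro lw
  induction lw with
  | nil => intro caps _ _ _; simp [pvLoop]
  | cons l rest ih =>
    intro caps hsort hlow hcaps
    rw [List.pairwise_cons] at hsort
    obtain ⟨hle, hsort'⟩ := hsort
    have hl : PySem.Chars.isupper l = false := hlow l List.mem_cons_self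
    have hlowr : ∀ x ∈ rest, PySem.Chars.isupper x = false :=
      fun x hx => hlow x (List.mem_cons_of_mem _ hx)
    -- lower bound for every later output element, given its letter l' ≥ l
    have hbound : ∀ (caps₂ : List Char), (∀ U ∈ caps₂, PySem.Chars.isupper U = true) →
        ∀ o ∈ pvLoop rest caps₂, 2 * l.toNat ≤ pvKey o ∧
          (pvKey o = 2 * l.toNat →
            (o = l ∧ PySem.Chars.islower l = false) ∨
              (o = PySem.Chars.upperChar l ∧ o ∈ caps₂)) := by
      intro caps₂ hcaps₂ o ho
      obtain ⟨l', hl', hcase⟩ := pvLoopMem rest caps₂ o ho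
      have hlel : l.toNat ≤ l'.toNat := (pvCharLe l l').mp (hle l' hl')
      have hl'low : PySem.Chars.isupper l' = false := hlowr l' hl'
      rcases hcase with heqo | ⟨heqo, hmem⟩
      · rw [heqo, pvKeyPlain l' hl'low]
        refine ⟨by omega, ?_⟩
        intro hk
        by_cases hb : PySem.Chars.islower l' = true
        · rw [if_pos hb] at hk; omega
        · rw [if_neg hb] at hk
          have heq : l' = l := (pvCharEq l' l).mpr (by omega)
          refine Or.inl ⟨heq, ?_⟩
          rw [← heq]
          simpa using hb
      · have hU2 : PySem.Chars.isupper (PySem.Chars.upperChar l') = true := hcaps₂ _ (heqo ▸ hmem)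
        have hll' : PySem.Chars.islower l' = true := pvLowOfUpperCharUpper l' hl'low hU2
        rw [heqo, pvKeyUpper l' hll']
        refine ⟨by omega, ?_⟩
        intro hk
        have heq : l' = l := (pvCharEq l' l).mpr (by omega)
        refine Or.inr ⟨?_, heqo ▸ hmem⟩
        rw [heq]
    rw [pvLoop]
    by_cases h : PySem.Chars.upperChar l ∈ caps
    · rw [if_pos h, List.pairwise_cons]
      have hU : PySem.Chars.isupper (PySem.Chars.upperChar l) = true := hcaps _ h
      have hll : PySem.Chars.islower l = true := pvLowOfUpperCharUpper l hl hU
      have hcaps' : ∀ U ∈ caps.erase (PySem.Chars.upperChar l), PySem.Chars.isupper U = true :=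
        fun U hU' => hcaps U (List.erase_subset hU')
      refine ⟨?_, ih _ hsort' hlowr hcaps'⟩
      intro o ho
      rw [pvKeyUpper l hll]
      exact (hbound _ hcaps' o ho).1
    · rw [if_neg h, List.pairwise_cons]
      refine ⟨?_, ih caps hsort' hlowr hcaps⟩
      intro o ho
      obtain ⟨hb1, hb2⟩ := hbound caps hcaps o ho
      rw [pvKeyPlain l hl]
      by_cases hb : PySem.Chars.islower l = true
      · rw [if_pos hb]
        rcases Nat.lt_or_ge (2 * l.toNat) (pvKey o) with hlt | hge
        · omega
        · have hk : pvKey o = 2 * l.toNat := by omega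
          rcases hb2 hk with ⟨_, hcon⟩ | ⟨heq2, hmem⟩
          · rw [hb] at hcon; exact absurd hcon (by simp)
          · exact absurd (heq2 ▸ hmem) h
      · rw [if_neg hb]; omega

-- lowered word + capitals is word + lowered capitals, as multisets
theorem pvSplitPerm : ∀ (cs : List Char),
    (cs.map PySem.Chars.lowerChar ++ cs.filter PySem.Chars.isupper).Perm
      (cs ++ (cs.filter PySem.Chars.isupper).map PySem.Chars.lowerChar) := by
  intro cs
  induction cs with
  | nil => simp
  | cons c cs' ih =>
    by_cases h : PySem.Chars.isupper c = true
    · simp only [List.map_cons, List.filter_cons_of_pos h]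
      have e1 : (PySem.Chars.lowerChar c :: (cs'.map PySem.Chars.lowerChar ++
            (c :: cs'.filter PySem.Chars.isupper))).Perm
          (PySem.Chars.lowerChar c :: c ::
            (cs'.map PySem.Chars.lowerChar ++ cs'.filter PySem.Chars.isupper)) :=
        List.perm_middle.cons _
      have e2 : (PySem.Chars.lowerChar c :: c ::
            (cs'.map PySem.Chars.lowerChar ++ cs'.filter PySem.Chars.isupper)).Perm
          (PySem.Chars.lowerChar c :: c ::
            (cs' ++ (cs'.filter PySem.Chars.isupper).map PySem.Chars.lowerChar)) :=
        (ih.cons _).cons _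
      have e3 : (PySem.Chars.lowerChar c :: c ::
            (cs' ++ (cs'.filter PySem.Chars.isupper).map PySem.Chars.lowerChar)).Perm
          (c :: PySem.Chars.lowerChar c ::
            (cs' ++ (cs'.filter PySem.Chars.isupper).map PySem.Chars.lowerChar)) :=
        List.Perm.swap _ _ _
      have e4 : (c :: PySem.Chars.lowerChar c ::
            (cs' ++ (cs'.filter PySem.Chars.isupper).map PySem.Chars.lowerChar)).Perm
          (c :: (cs' ++ PySem.Chars.lowerChar c ::
            (cs'.filter PySem.Chars.isupper).map PySem.Chars.lowerChar)) :=
        List.perm_middle.symm.cons _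
      exact ((e1.trans e2).trans e3).trans e4
    · have h' : PySem.Chars.isupper c = false := by simpa using h
      rw [List.map_cons, List.filter_cons_of_neg (by simp [h']), pvLowerCharId c h',
        List.cons_append, List.cons_append]
      exact ih.cons c

-- the two list computations agree
theorem pvListEq (cs : List Char) :
    ((PySem.List.sorted (PySem.Chars.lower cs) (fun c => c) false).foldl
      (fun (s : List Char × List Char) letter =>
        if PySem.Chars.upperChar letter ∈ s.2 then
          (s.1 ++ [PySem.Chars.upperChar letter], s.2.erase (PySem.Chars.upperChar letter))
        else
          (s.1 ++ [letter], s.2))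
      ([], (PySem.List.sorted cs (fun c => c) false).foldl
        (fun acc letter => if PySem.Chars.isupper letter then acc ++ [letter] else acc) [])).1 =
    PySem.List.sorted cs pvKey false := by
  have hcap : (PySem.List.sorted cs (fun c => c) false).foldl
      (fun acc letter => if PySem.Chars.isupper letter then acc ++ [letter] else acc) [] =
      (PySem.List.sorted cs (fun c => c) false).filter PySem.Chars.isupper := by
    rw [PySem.List.foldl_append_if_eq_filter]
    simp
  rw [hcap, pvFoldlEq, List.nil_append]
  set lw := PySem.List.sorted (PySem.Chars.lower cs) (fun c => c) false with hlw
  set caps := (PySem.List.sorted cs (fun c => c) false).filter PySem.Chars.isupper with hcaps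
  -- facts about lw and caps
  have hlwperm : lw.Perm (cs.map PySem.Chars.lowerChar) := by
    rw [hlw]
    exact (PySem.List.sorted_perm _ _ _).trans (by rw [PySem.Chars.lower])
  have hlwlow : ∀ l ∈ lw, PySem.Chars.isupper l = false := by
    intro l hl
    have : l ∈ cs.map PySem.Chars.lowerChar := hlwperm.mem_iff.mp hl
    obtain ⟨y, _, rfl⟩ := List.mem_map.mp this
    exact pvNotUpperLowerChar y
  have hcapsperm : caps.Perm (cs.filter PySem.Chars.isupper) :=
    (PySem.List.sorted_perm cs (fun c => c) false).filter _
  have hcapsup : ∀ U ∈ caps, PySem.Chars.isupper U = true := by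
    intro U hU
    exact (List.mem_filter.mp hU).2
  have hcount : ∀ U ∈ caps, caps.count U ≤ lw.count (PySem.Chars.lowerChar U) := by
    intro U hU
    have hup := hcapsup U hU
    have h1 : caps.count U = cs.count U := by
      rw [hcapsperm.count_eq, List.count_filter]
      simp [hup]
    have h2 : lw.count (PySem.Chars.lowerChar U) =
        (cs.map PySem.Chars.lowerChar).count (PySem.Chars.lowerChar U) := hlwperm.count_eq _
    rw [h1, h2]
    exact List.count_le_count_map
  -- A's output is a permutation of cs
  have hperm1 := pvLoopPerm lw caps hlwlow hcapsup hcount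
  have hperm2 : (lw ++ caps).Perm (cs ++ caps.map PySem.Chars.lowerChar) := by
    have f1 : (lw ++ caps).Perm
        (cs.map PySem.Chars.lowerChar ++ cs.filter PySem.Chars.isupper) :=
      hlwperm.append hcapsperm
    have f2 := pvSplitPerm cs
    have f3 : (cs ++ (cs.filter PySem.Chars.isupper).map PySem.Chars.lowerChar).Perm
        (cs ++ caps.map PySem.Chars.lowerChar) :=
      (hcapsperm.symm.map PySem.Chars.lowerChar).append_left cs
    exact (f1.trans f2).trans f3
  have hpermA : (pvLoop lw caps).Perm cs :=
    (List.perm_append_right_iff (caps.map PySem.Chars.lowerChar)).mp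
      (hperm1.trans hperm2)
  -- A's output is sorted by the packed key
  have hsortlw : lw.Pairwise (· ≤ ·) :=
    PySem.List.sorted_pairwise (PySem.Chars.lower cs) (fun c => c)
  have hpwA := pvLoopPairwise lw caps hsortlw hlwlow hcapsup
  -- B's output: sorted by the key and a permutation of cs
  have hpermB : (PySem.List.sorted cs pvKey false).Perm cs := PySem.List.sorted_perm _ _ _
  have hpwB : (PySem.List.sorted cs pvKey false).Pairwise (fun a b => pvKey a ≤ pvKey b) :=
    PySem.List.sorted_pairwise cs pvKey
  exact PySem.List.eq_of_perm_of_pairwise_le_of_injective pvKey pvKeyInj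
    (hpermA.trans hpermB.symm) hpwA hpwB

-- ===== VERDICT (by name: the statement is the Claim_ definition above) =====
theorem alphapetize_spec : Claim_equal_alphapetize := by
  intro word _
  unfold Spec_alphapetize alphapetize alphapetize_alt
  rw [pvAltEq]
  exact congrArg String.mk (pvListEq word.toList)
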